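-- pv_equiv track=rewrite | github.com/pall23-mech/ASR_deliverables | TestingWER_Deliverables/wer_eval/metrics.py | _levenshtein_counts
-- ===== SOURCE A (Python) =====
-- def _levenshtein_counts(ref: list, hyp: list) -> tuple[int, int, int, int]:
--     """
--     Classic dynamic-programming alignment.
--     Returns (hits, substitutions, deletions, insertions).
--     """
--     n, m = len(ref), len(hyp)
--     # dp[i][j] = (cost, hits, subs, dels, ins)
--     INF = float("inf")
--     dp = [[(INF, 0, 0, 0, 0)] * (m + 1) for _ in range(n + 1)]
--     dp[0][0] = (0, 0, 0, 0, 0)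
--     for i in range(1, n + 1):
--         cost, h, s, d, ins = dp[i - 1][0]
--         dp[i][0] = (cost + 1, h, s, d + 1, ins)
--     for j in range(1, m + 1):
--         cost, h, s, d, ins = dp[0][j - 1]
--         dp[0][j] = (cost + 1, h, s, d, ins + 1)
--
--     for i in range(1, n + 1):
--         for j in range(1, m + 1):
--             if ref[i - 1] == hyp[j - 1]:
--                 c, h, s, d, ins = dp[i - 1][j - 1]
--                 dp[i][j] = (c, h + 1, s, d, ins)
--             else:
--                 # substitution
--                 cs, hs, ss, ds, inss = dp[i - 1][j - 1]
--                 opt_s = (cs + 1, hs, ss + 1, ds, inss)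
--                 # deletion
--                 cd, hd, sd, dd, insd = dp[i - 1][j]
--                 opt_d = (cd + 1, hd, sd, dd + 1, insd)
--                 # insertion
--                 ci, hi, si, di, insi = dp[i][j - 1]
--                 opt_i = (ci + 1, hi, si, di, insi + 1)
--                 dp[i][j] = min(opt_s, opt_d, opt_i, key=lambda x: x[0])
--
--     _, h, s, d, ins = dp[n][m]
--     return h, s, d, ins
-- ===== SOURCE B (Python) =====
-- def _levenshtein_counts(ref: list, hyp: list) -> tuple[int, int, int, int]:
--     """
--     Cost-only Levenshtein matrix followed by a traceback that counts
--     hits/substitutions/deletions/insertions (diagonal preferred on a match;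
--     otherwise substitution, then deletion, then insertion on cost ties).
--     """
--     n, m = len(ref), len(hyp)
--     dp = [[0] * (m + 1) for _ in range(n + 1)]
--     for i in range(n + 1):
--         dp[i][0] = i
--     for j in range(m + 1):
--         dp[0][j] = j
--     for i in range(1, n + 1):
--         for j in range(1, m + 1):
--             if ref[i - 1] == hyp[j - 1]:
--                 dp[i][j] = dp[i - 1][j - 1]
--             else:
--                 dp[i][j] = 1 + min(dp[i - 1][j - 1], dp[i - 1][j], dp[i][j - 1])
--     h = s = d = ins = 0
--     i, j = n, m
--     while i > 0 or j > 0: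
--         if i > 0 and j > 0 and ref[i - 1] == hyp[j - 1]:
--             h += 1; i -= 1; j -= 1
--         elif i > 0 and j > 0 and dp[i - 1][j - 1] <= dp[i - 1][j] and dp[i - 1][j - 1] <= dp[i][j - 1]:
--             s += 1; i -= 1; j -= 1
--         elif i > 0 and (j == 0 or dp[i - 1][j] <= dp[i][j - 1]):
--             d += 1; i -= 1
--         else:
--             ins += 1; j -= 1
--     return h, s, d, ins
-- ===== Notes on version B (the rewrite author's own statement) =====
-- stated objective: alternative
-- what changed: A carries (cost,hits,subs,dels,ins) 5-tuples through every DP cell; B fills a plain integer cost matrix and recovers the four counts by a traceback from (n,m) that replays A's tie-break (match -> diagonal; otherwise substitution, then deletion, then insertion).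
import Mathlib
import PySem

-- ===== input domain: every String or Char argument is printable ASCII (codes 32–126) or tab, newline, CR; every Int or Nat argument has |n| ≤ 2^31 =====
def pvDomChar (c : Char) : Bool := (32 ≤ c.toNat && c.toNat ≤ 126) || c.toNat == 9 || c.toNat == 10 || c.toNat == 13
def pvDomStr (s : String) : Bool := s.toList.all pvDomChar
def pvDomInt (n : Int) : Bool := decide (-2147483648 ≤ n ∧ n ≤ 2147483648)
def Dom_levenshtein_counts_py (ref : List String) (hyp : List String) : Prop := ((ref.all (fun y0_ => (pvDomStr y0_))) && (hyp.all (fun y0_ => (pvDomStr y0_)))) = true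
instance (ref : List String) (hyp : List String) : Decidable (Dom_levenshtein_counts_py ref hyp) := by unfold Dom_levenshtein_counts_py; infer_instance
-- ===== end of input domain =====

-- B replaces A's matrix of (cost,hits,subs,dels,ins) tuples by a plain integer cost
-- matrix followed by a traceback that counts the operations (objective: alternative decomposition).

-- shared matrix helpers: dp[i][j] read / write, as both Pythons index their list-of-lists
def pvGet2 {α : Type} (dp : List (List α)) (i j : Nat) (d : α) : α :=
  (dp.getD i []).getD j d

def pvSet2 {α : Type} (dp : List (List α)) (i j : Nat) (v : α) : List (List α) :=
  dp.set i ((dp.getD i []).set j v)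

-- the nested fill loops both Pythons share:
-- for i in range(1,n+1): for j in range(1,m+1): dp[i][j] = f(dp[i-1][j-1], dp[i-1][j], dp[i][j-1], i-1, j-1)
def pvFill {α : Type} (f : α → α → α → Nat → Nat → α) (d0 : α) (n m : Nat)
    (dp : List (List α)) : List (List α) :=
  (List.range n).foldl (fun dp i0 =>
    (List.range m).foldl (fun dp j0 =>
      pvSet2 dp (i0+1) (j0+1)
        (f (pvGet2 dp i0 j0 d0) (pvGet2 dp i0 (j0+1) d0) (pvGet2 dp (i0+1) j0 d0) i0 j0)) dp) dp

-- ===== PORT A =====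
-- placeholder cell (INF,0,0,0,0): the Python never reads it (every consulted cell is
-- assigned first), so its float('inf') cost field is modeled as 0.
def pvInfA : Int × Int × Int × Int × Int := (0, 0, 0, 0, 0)

-- dp = [[(INF,0,0,0,0)]*(m+1) for _ in range(n+1)]; dp[0][0] = (0,0,0,0,0)
def pvInitA (n m : Nat) : List (List (Int × Int × Int × Int × Int)) :=
  pvSet2 ((List.range (n+1)).map (fun _ => List.replicate (m+1) pvInfA)) 0 0 (0, 0, 0, 0, 0)

-- for i in range(1, n+1): dp[i][0] = (cost+1, h, s, d+1, ins) of dp[i-1][0]   (i = i0+1)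
def pvColLoopA (n : Nat) (dp : List (List (Int × Int × Int × Int × Int))) :
    List (List (Int × Int × Int × Int × Int)) :=
  (List.range n).foldl (fun dp i0 =>
    let t := pvGet2 dp i0 0 pvInfA
    pvSet2 dp (i0+1) 0 (t.1 + 1, t.2.1, t.2.2.1, t.2.2.2.1 + 1, t.2.2.2.2)) dp

-- for j in range(1, m+1): dp[0][j] = (cost+1, h, s, d, ins+1) of dp[0][j-1]   (j = j0+1)
def pvRowLoopA (m : Nat) (dp : List (List (Int × Int × Int × Int × Int))) :
    List (List (Int × Int × Int × Int × Int)) :=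
  (List.range m).foldl (fun dp j0 =>
    let t := pvGet2 dp 0 j0 pvInfA
    pvSet2 dp 0 (j0+1) (t.1 + 1, t.2.1, t.2.2.1, t.2.2.2.1, t.2.2.2.2 + 1)) dp

-- body of A's inner loop: match takes the diagonal; otherwise min(opt_s, opt_d, opt_i,
-- key=cost), Python's min keeping the FIRST minimum (left fold with strict <)
def pvStepA (ref hyp : List String) (diag up left : Int × Int × Int × Int × Int)
    (i j : Nat) : Int × Int × Int × Int × Int :=
  if ref.getD i "" = hyp.getD j "" then
    (diag.1, diag.2.1 + 1, diag.2.2.1, diag.2.2.2.1, diag.2.2.2.2)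
  else
    let opt_s := (diag.1 + 1, diag.2.1, diag.2.2.1 + 1, diag.2.2.2.1, diag.2.2.2.2)
    let opt_d := (up.1 + 1, up.2.1, up.2.2.1, up.2.2.2.1 + 1, up.2.2.2.2)
    let opt_i := (left.1 + 1, left.2.1, left.2.2.1, left.2.2.2.1, left.2.2.2.2 + 1)
    let m1 := if opt_d.1 < opt_s.1 then opt_d else opt_s
    if opt_i.1 < m1.1 then opt_i else m1

def levenshtein_counts_py (ref : List String) (hyp : List String) : Int × Int × Int × Int :=
  let n := ref.length
  let m := hyp.length
  let dp := pvInitA n m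
  let dp := pvColLoopA n dp
  let dp := pvRowLoopA m dp
  let dp := pvFill (pvStepA ref hyp) pvInfA n m dp
  let t := pvGet2 dp n m pvInfA
  (t.2.1, t.2.2.1, t.2.2.2.1, t.2.2.2.2)

-- ===== PORT B =====
-- dp = [[0]*(m+1) for _ in range(n+1)]
def pvInitB (n m : Nat) : List (List Int) :=
  (List.range (n+1)).map (fun _ => List.replicate (m+1) 0)

-- for i in range(n+1): dp[i][0] = i
def pvColLoopB (n : Nat) (dp : List (List Int)) : List (List Int) :=
  (List.range (n+1)).foldl (fun dp i => pvSet2 dp i 0 (i : Int)) dp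

-- for j in range(m+1): dp[0][j] = j
def pvRowLoopB (m : Nat) (dp : List (List Int)) : List (List Int) :=
  (List.range (m+1)).foldl (fun dp j => pvSet2 dp 0 j (j : Int)) dp

-- body of B's inner loop: the plain Levenshtein cost recurrence
def pvStepB (ref hyp : List String) (diag up left : Int) (i j : Nat) : Int :=
  if ref.getD i "" = hyp.getD j "" then diag else 1 + min (min diag up) left

-- B's while-loop traceback (counters h,s,d,ins; (i,j) walks back to (0,0))
def pvTraceback (ref hyp : List String) (dp : List (List Int)) (i j : Nat)
    (h s d ins : Int) : Int × Int × Int × Int :=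
  if hw : 0 < i ∨ 0 < j then
    if h1 : 0 < i ∧ 0 < j ∧ ref.getD (i-1) "" = hyp.getD (j-1) "" then
      pvTraceback ref hyp dp (i-1) (j-1) (h+1) s d ins
    else if h2 : 0 < i ∧ 0 < j ∧ pvGet2 dp (i-1) (j-1) 0 ≤ pvGet2 dp (i-1) j 0 ∧
        pvGet2 dp (i-1) (j-1) 0 ≤ pvGet2 dp i (j-1) 0 then
      pvTraceback ref hyp dp (i-1) (j-1) h (s+1) d ins
    else if h3 : 0 < i ∧ (j = 0 ∨ pvGet2 dp (i-1) j 0 ≤ pvGet2 dp i (j-1) 0) then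
      pvTraceback ref hyp dp (i-1) j h s (d+1) ins
    else
      pvTraceback ref hyp dp i (j-1) h s d (ins+1)
  else (h, s, d, ins)
termination_by i + j
decreasing_by
  · omega
  · omega
  · omega
  · rcases Nat.eq_zero_or_pos j with hj | hj
    · exact absurd ⟨by omega, Or.inl hj⟩ h3
    · omega

def levenshtein_counts_py_alt (ref : List String) (hyp : List String) : Int × Int × Int × Int :=
  let n := ref.length
  let m := hyp.length
  let dp := pvInitB n m
  let dp := pvColLoopB n dp
  let dp := pvRowLoopB m dp
  let dp := pvFill (pvStepB ref hyp) 0 n m dp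
  pvTraceback ref hyp dp n m 0 0 0 0

-- ===== PRECONDITION & SPEC =====
def Spec_levenshtein_counts_py (ref : List String) (hyp : List String) (out : Int × Int × Int × Int) : Prop := out = levenshtein_counts_py_alt ref hyp
instance (ref : List String) (hyp : List String) (out : Int × Int × Int × Int) : Decidable (Spec_levenshtein_counts_py ref hyp out) := by unfold Spec_levenshtein_counts_py; infer_instance

-- ===== CLAIM (what is proved, stated in full; the proofs are below) =====
def Claim_equal_levenshtein_counts_py : Prop := ∀ (ref : List String) (hyp : List String), Dom_levenshtein_counts_py ref hyp → Spec_levenshtein_counts_py ref hyp (levenshtein_counts_py ref hyp)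

-- ===== LEMMAS AND PROOFS =====

-- the clean recursive characterisation of A's dp cell (cost, hits, subs, dels, ins)
def pvCell (ref hyp : List String) : Nat → Nat → Int × Int × Int × Int × Int
  | 0, 0 => (0, 0, 0, 0, 0)
  | i+1, 0 => let t := pvCell ref hyp i 0; (t.1 + 1, t.2.1, t.2.2.1, t.2.2.2.1 + 1, t.2.2.2.2)
  | 0, j+1 => let t := pvCell ref hyp 0 j; (t.1 + 1, t.2.1, t.2.2.1, t.2.2.2.1, t.2.2.2.2 + 1)
  | i+1, j+1 => pvStepA ref hyp (pvCell ref hyp i j) (pvCell ref hyp i (j+1)) (pvCell ref hyp (i+1) j) i j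

def pvShape {α : Type} (dp : List (List α)) (n m : Nat) : Prop :=
  dp.length = n+1 ∧ ∀ i < n+1, (dp.getD i []).length = m+1

theorem pvGetD_set {α : Type} (dp : List α) (i k : Nat) (r : α) (d : α) :
    (dp.set i r).getD k d = if k = i ∧ i < dp.length then r else dp.getD k d := by
  simp [List.getD_eq_getElem?_getD, List.getElem?_set]
  split_ifs with h1 h2 h3 <;> simp_all

theorem pvSet2_shape {α : Type} {dp : List (List α)} {n m : Nat} (i j : Nat) (v : α)
    (hs : pvShape dp n m) : pvShape (pvSet2 dp i j v) n m := by
  obtain ⟨h1, h2⟩ := hs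
  refine ⟨by simp [pvSet2, h1], ?_⟩
  intro k hk
  rw [pvSet2, pvGetD_set]
  split_ifs with h
  · rw [List.length_set]; exact h2 i (by omega)
  · exact h2 k hk

theorem pvGet2_set_self {α : Type} {dp : List (List α)} {n m : Nat} {i j : Nat} (v d : α)
    (hs : pvShape dp n m) (hi : i < n+1) (hj : j < m+1) :
    pvGet2 (pvSet2 dp i j v) i j d = v := by
  obtain ⟨h1, h2⟩ := hs
  rw [pvGet2, pvSet2, pvGetD_set, if_pos ⟨rfl, by omega⟩, pvGetD_set,
    if_pos ⟨rfl, by rw [h2 i hi]; omega⟩]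

theorem pvGet2_set_ne {α : Type} {dp : List (List α)} {i j i' j' : Nat} (v d : α)
    (hne : i' ≠ i ∨ j' ≠ j) :
    pvGet2 (pvSet2 dp i j v) i' j' d = pvGet2 dp i' j' d := by
  rw [pvGet2, pvSet2, pvGetD_set, pvGet2]
  split_ifs with h
  · obtain ⟨rfl, _⟩ := h
    rcases hne with hne | hne
    · exact absurd rfl hne
    · rw [pvGetD_set, if_neg (by tauto)]
  · rfl

-- the inner fill loop: fills row i0+1 left to right
theorem pvFill_inner {α : Type} (f : α → α → α → Nat → Nat → α) (d0 : α) (F : Nat → Nat → α)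
    (n m i0 : Nat) (hi0 : i0 < n) (dp : List (List α)) (hs : pvShape dp n m)
    (hF : ∀ i j, F (i+1) (j+1) = f (F i j) (F i (j+1)) (F (i+1) j) i j)
    (hprev : ∀ j ≤ m, pvGet2 dp i0 j d0 = F i0 j)
    (hcol : pvGet2 dp (i0+1) 0 d0 = F (i0+1) 0) :
    ∀ l ≤ m,
      pvShape ((List.range l).foldl (fun dp j0 => pvSet2 dp (i0+1) (j0+1)
        (f (pvGet2 dp i0 j0 d0) (pvGet2 dp i0 (j0+1) d0) (pvGet2 dp (i0+1) j0 d0) i0 j0)) dp) n m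
      ∧ (∀ i j, (i ≠ i0+1 ∨ j = 0 ∨ l < j) →
          pvGet2 ((List.range l).foldl (fun dp j0 => pvSet2 dp (i0+1) (j0+1)
            (f (pvGet2 dp i0 j0 d0) (pvGet2 dp i0 (j0+1) d0) (pvGet2 dp (i0+1) j0 d0) i0 j0)) dp) i j d0
          = pvGet2 dp i j d0)
      ∧ (∀ j, 1 ≤ j → j ≤ l →
          pvGet2 ((List.range l).foldl (fun dp j0 => pvSet2 dp (i0+1) (j0+1)
            (f (pvGet2 dp i0 j0 d0) (pvGet2 dp i0 (j0+1) d0) (pvGet2 dp (i0+1) j0 d0) i0 j0)) dp) (i0+1) j d0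
          = F (i0+1) j) := by
  intro l
  induction l with
  | zero => exact fun _ => ⟨hs, fun i j _ => rfl, fun j hj1 hj0 => by omega⟩
  | succ l ih =>
    intro hl
    obtain ⟨ihs, ihpres, ihdone⟩ := ih (by omega)
    rw [List.range_succ, List.foldl_append, List.foldl_cons, List.foldl_nil]
    set dp' := (List.range l).foldl (fun dp j0 => pvSet2 dp (i0+1) (j0+1)
      (f (pvGet2 dp i0 j0 d0) (pvGet2 dp i0 (j0+1) d0) (pvGet2 dp (i0+1) j0 d0) i0 j0)) dp with hdp'
    have r1 : pvGet2 dp' i0 l d0 = F i0 l := by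
      rw [ihpres i0 l (Or.inl (by omega))]; exact hprev l (by omega)
    have r2 : pvGet2 dp' i0 (l+1) d0 = F i0 (l+1) := by
      rw [ihpres i0 (l+1) (Or.inl (by omega))]; exact hprev (l+1) (by omega)
    have r3 : pvGet2 dp' (i0+1) l d0 = F (i0+1) l := by
      match l with
      | 0 => rw [ihpres (i0+1) 0 (Or.inr (Or.inl rfl))]; exact hcol
      | l+1 => exact ihdone (l+1) (by omega) (by omega)
    have hv : f (pvGet2 dp' i0 l d0) (pvGet2 dp' i0 (l+1) d0) (pvGet2 dp' (i0+1) l d0) i0 l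
        = F (i0+1) (l+1) := by rw [r1, r2, r3, hF]
    refine ⟨pvSet2_shape _ _ _ ihs, ?_, ?_⟩
    · intro i j hc
      rw [pvGet2_set_ne]
      · exact ihpres i j (by omega)
      · omega
    · intro j hj1 hjl
      rcases Nat.lt_or_ge j (l+1) with hj | hj
      · rw [pvGet2_set_ne _ _ (Or.inr (by omega))]
        exact ihdone j hj1 (by omega)
      · have hj' : j = l+1 := by omega
        subst hj'
        rw [pvGet2_set_self _ _ ihs (by omega) (by omega), hv]

-- the outer fill loop: fills rows 1..k
theorem pvFill_outer {α : Type} (f : α → α → α → Nat → Nat → α) (d0 : α) (F : Nat → Nat → α)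
    (n m : Nat) (dp : List (List α)) (hs : pvShape dp n m)
    (hF : ∀ i j, F (i+1) (j+1) = f (F i j) (F i (j+1)) (F (i+1) j) i j)
    (hrow0 : ∀ j ≤ m, pvGet2 dp 0 j d0 = F 0 j)
    (hcol0 : ∀ i ≤ n, pvGet2 dp i 0 d0 = F i 0) :
    ∀ k ≤ n,
      pvShape ((List.range k).foldl (fun dp i0 => (List.range m).foldl (fun dp j0 =>
        pvSet2 dp (i0+1) (j0+1) (f (pvGet2 dp i0 j0 d0) (pvGet2 dp i0 (j0+1) d0)
          (pvGet2 dp (i0+1) j0 d0) i0 j0)) dp) dp) n m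
      ∧ (∀ i j, (i = 0 ∨ k < i ∨ j = 0) →
          pvGet2 ((List.range k).foldl (fun dp i0 => (List.range m).foldl (fun dp j0 =>
            pvSet2 dp (i0+1) (j0+1) (f (pvGet2 dp i0 j0 d0) (pvGet2 dp i0 (j0+1) d0)
              (pvGet2 dp (i0+1) j0 d0) i0 j0)) dp) dp) i j d0 = pvGet2 dp i j d0)
      ∧ (∀ i, 1 ≤ i → i ≤ k → ∀ j ≤ m,
          pvGet2 ((List.range k).foldl (fun dp i0 => (List.range m).foldl (fun dp j0 =>
            pvSet2 dp (i0+1) (j0+1) (f (pvGet2 dp i0 j0 d0) (pvGet2 dp i0 (j0+1) d0)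
              (pvGet2 dp (i0+1) j0 d0) i0 j0)) dp) dp) i j d0 = F i j) := by
  intro k
  induction k with
  | zero => exact fun _ => ⟨hs, fun i j _ => rfl, fun i hi1 hi0 j _ => by omega⟩
  | succ k ih =>
    intro hk
    obtain ⟨ihs, ihpres, ihdone⟩ := ih (by omega)
    rw [List.range_succ, List.foldl_append, List.foldl_cons, List.foldl_nil]
    set dp' := (List.range k).foldl (fun dp i0 => (List.range m).foldl (fun dp j0 =>
      pvSet2 dp (i0+1) (j0+1) (f (pvGet2 dp i0 j0 d0) (pvGet2 dp i0 (j0+1) d0)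
        (pvGet2 dp (i0+1) j0 d0) i0 j0)) dp) dp with hdp'
    have hprev : ∀ j ≤ m, pvGet2 dp' k j d0 = F k j := by
      intro j hj
      match k with
      | 0 => rw [ihpres 0 j (Or.inl rfl)]; exact hrow0 j hj
      | k+1 =>
        rcases Nat.eq_zero_or_pos j with rfl | hj0
        · rw [ihpres (k+1) 0 (Or.inr (Or.inr rfl))]; exact hcol0 (k+1) (by omega)
        · exact ihdone (k+1) (by omega) (by omega) j hj
    have hcol : pvGet2 dp' (k+1) 0 d0 = F (k+1) 0 := by
      rw [ihpres (k+1) 0 (Or.inr (Or.inr rfl))]; exact hcol0 (k+1) (by omega)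
    obtain ⟨s', pres', done'⟩ :=
      pvFill_inner f d0 F n m k (by omega) dp' ihs hF hprev hcol m (le_refl m)
    refine ⟨s', ?_, ?_⟩
    · intro i j hc
      rw [pres' i j (by omega)]
      exact ihpres i j (by omega)
    · intro i hi1 hik j hj
      rcases Nat.lt_or_ge i (k+1) with hi | hi
      · rw [pres' i j (Or.inl (by omega))]
        exact ihdone i hi1 (by omega) j hj
      · have : i = k+1 := by omega
        subst this
        rcases Nat.eq_zero_or_pos j with rfl | hj0
        · rw [pres' (k+1) 0 (by omega), hcol]
        · exact done' j (by omega) hj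
      
theorem pvFill_correct {α : Type} (f : α → α → α → Nat → Nat → α) (d0 : α) (F : Nat → Nat → α)
    (n m : Nat) (dp : List (List α)) (hs : pvShape dp n m)
    (hF : ∀ i j, F (i+1) (j+1) = f (F i j) (F i (j+1)) (F (i+1) j) i j)
    (hrow0 : ∀ j ≤ m, pvGet2 dp 0 j d0 = F 0 j)
    (hcol0 : ∀ i ≤ n, pvGet2 dp i 0 d0 = F i 0) :
    ∀ i ≤ n, ∀ j ≤ m, pvGet2 (pvFill f d0 n m dp) i j d0 = F i j := by
  obtain ⟨_, pres, done⟩ := pvFill_outer f d0 F n m dp hs hF hrow0 hcol0 n (le_refl n)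
  intro i hi j hj
  rcases Nat.eq_zero_or_pos i with rfl | hi0
  · show pvGet2 ((List.range n).foldl _ dp) 0 j d0 = F 0 j
    rw [pres 0 j (Or.inl rfl)]; exact hrow0 j hj
  · exact done i hi0 hi j hj


theorem pvInitA_shape (n m : Nat) : pvShape (pvInitA n m) n m := by
  apply pvSet2_shape
  refine ⟨by simp, ?_⟩
  intro i hi
  simp [List.getD_eq_getElem?_getD, hi]

theorem pvInitA_00 (n m : Nat) :
    pvGet2 (pvInitA n m) 0 0 pvInfA = (0, 0, 0, 0, 0) := by
  apply pvGet2_set_self (n := n) (m := m)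
  · refine ⟨by simp, ?_⟩
    intro i hi
    simp [List.getD_eq_getElem?_getD, hi]
  · omega
  · omega

theorem pvColA_aux (ref hyp : List String) (n m : Nat)
    (dp : List (List (Int × Int × Int × Int × Int))) (hs : pvShape dp n m)
    (h00 : pvGet2 dp 0 0 pvInfA = pvCell ref hyp 0 0) :
    ∀ k ≤ n,
      pvShape ((List.range k).foldl (fun dp i0 =>
        let t := pvGet2 dp i0 0 pvInfA
        pvSet2 dp (i0+1) 0 (t.1 + 1, t.2.1, t.2.2.1, t.2.2.2.1 + 1, t.2.2.2.2)) dp) n m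
      ∧ (∀ i j, (j ≠ 0 ∨ i = 0 ∨ k < i) →
          pvGet2 ((List.range k).foldl (fun dp i0 =>
            let t := pvGet2 dp i0 0 pvInfA
            pvSet2 dp (i0+1) 0 (t.1 + 1, t.2.1, t.2.2.1, t.2.2.2.1 + 1, t.2.2.2.2)) dp) i j pvInfA
          = pvGet2 dp i j pvInfA)
      ∧ (∀ i ≤ k, pvGet2 ((List.range k).foldl (fun dp i0 =>
            let t := pvGet2 dp i0 0 pvInfA
            pvSet2 dp (i0+1) 0 (t.1 + 1, t.2.1, t.2.2.1, t.2.2.2.1 + 1, t.2.2.2.2)) dp) i 0 pvInfA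
          = pvCell ref hyp i 0) := by
  intro k
  induction k with
  | zero =>
    refine fun _ => ⟨hs, fun i j _ => rfl, ?_⟩
    intro i hi
    have : i = 0 := by omega
    subst this; exact h00
  | succ k ih =>
    intro hk
    obtain ⟨ihs, ihpres, ihdone⟩ := ih (by omega)
    rw [List.range_succ, List.foldl_append, List.foldl_cons, List.foldl_nil]
    set dp' := (List.range k).foldl (fun dp i0 =>
      let t := pvGet2 dp i0 0 pvInfA
      pvSet2 dp (i0+1) 0 (t.1 + 1, t.2.1, t.2.2.1, t.2.2.2.1 + 1, t.2.2.2.2)) dp with hdp'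
    have hread : pvGet2 dp' k 0 pvInfA = pvCell ref hyp k 0 := ihdone k (by omega)
    refine ⟨pvSet2_shape _ _ _ ihs, ?_, ?_⟩
    · intro i j hc
      show pvGet2 (pvSet2 dp' (k+1) 0 _) i j pvInfA = _
      rw [pvGet2_set_ne _ _ (by omega)]
      exact ihpres i j (by omega)
    · intro i hi
      rcases Nat.lt_or_ge i (k+1) with hik | hik
      · show pvGet2 (pvSet2 dp' (k+1) 0 _) i 0 pvInfA = _
        rw [pvGet2_set_ne _ _ (Or.inl (by omega))]
        exact ihdone i (by omega)
      · have : i = k+1 := by omega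
        subst this
        show pvGet2 (pvSet2 dp' (k+1) 0 _) (k+1) 0 pvInfA = _
        rw [pvGet2_set_self _ _ ihs (by omega) (by omega), hread]
        simp [pvCell]

theorem pvRowA_aux (ref hyp : List String) (n m : Nat)
    (dp : List (List (Int × Int × Int × Int × Int))) (hs : pvShape dp n m)
    (h00 : pvGet2 dp 0 0 pvInfA = pvCell ref hyp 0 0) :
    ∀ l ≤ m,
      pvShape ((List.range l).foldl (fun dp j0 =>
        let t := pvGet2 dp 0 j0 pvInfA
        pvSet2 dp 0 (j0+1) (t.1 + 1, t.2.1, t.2.2.1, t.2.2.2.1, t.2.2.2.2 + 1)) dp) n m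
      ∧ (∀ i j, (i ≠ 0 ∨ j = 0 ∨ l < j) →
          pvGet2 ((List.range l).foldl (fun dp j0 =>
            let t := pvGet2 dp 0 j0 pvInfA
            pvSet2 dp 0 (j0+1) (t.1 + 1, t.2.1, t.2.2.1, t.2.2.2.1, t.2.2.2.2 + 1)) dp) i j pvInfA
          = pvGet2 dp i j pvInfA)
      ∧ (∀ j ≤ l, pvGet2 ((List.range l).foldl (fun dp j0 =>
            let t := pvGet2 dp 0 j0 pvInfA
            pvSet2 dp 0 (j0+1) (t.1 + 1, t.2.1, t.2.2.1, t.2.2.2.1, t.2.2.2.2 + 1)) dp) 0 j pvInfA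
          = pvCell ref hyp 0 j) := by
  intro l
  induction l with
  | zero =>
    refine fun _ => ⟨hs, fun i j _ => rfl, ?_⟩
    intro j hj
    have : j = 0 := by omega
    subst this; exact h00
  | succ l ih =>
    intro hl
    obtain ⟨ihs, ihpres, ihdone⟩ := ih (by omega)
    rw [List.range_succ, List.foldl_append, List.foldl_cons, List.foldl_nil]
    set dp' := (List.range l).foldl (fun dp j0 =>
      let t := pvGet2 dp 0 j0 pvInfA
      pvSet2 dp 0 (j0+1) (t.1 + 1, t.2.1, t.2.2.1, t.2.2.2.1, t.2.2.2.2 + 1)) dp with hdp'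
    have hread : pvGet2 dp' 0 l pvInfA = pvCell ref hyp 0 l := ihdone l (by omega)
    refine ⟨pvSet2_shape _ _ _ ihs, ?_, ?_⟩
    · intro i j hc
      show pvGet2 (pvSet2 dp' 0 (l+1) _) i j pvInfA = _
      rw [pvGet2_set_ne _ _ (by omega)]
      exact ihpres i j (by omega)
    · intro j hj
      rcases Nat.lt_or_ge j (l+1) with hjl | hjl
      · show pvGet2 (pvSet2 dp' 0 (l+1) _) 0 j pvInfA = _
        rw [pvGet2_set_ne _ _ (Or.inr (by omega))]
        exact ihdone j (by omega)
      · have : j = l+1 := by omega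
        subst this
        show pvGet2 (pvSet2 dp' 0 (l+1) _) 0 (l+1) pvInfA = _
        rw [pvGet2_set_self _ _ ihs (by omega) (by omega), hread]
        simp [pvCell]


theorem pvInitB_shape (n m : Nat) : pvShape (pvInitB n m) n m := by
  refine ⟨by simp [pvInitB], ?_⟩
  intro i hi
  simp [pvInitB, List.getD_eq_getElem?_getD, hi]

theorem pvColB_aux (n m : Nat) (dp : List (List Int)) (hs : pvShape dp n m) :
    ∀ k ≤ n+1,
      pvShape ((List.range k).foldl (fun dp i => pvSet2 dp i 0 (i : Int)) dp) n m
      ∧ (∀ i j, (j ≠ 0 ∨ k ≤ i) →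
          pvGet2 ((List.range k).foldl (fun dp i => pvSet2 dp i 0 (i : Int)) dp) i j 0
          = pvGet2 dp i j 0)
      ∧ (∀ i < k, pvGet2 ((List.range k).foldl (fun dp i => pvSet2 dp i 0 (i : Int)) dp) i 0 0
          = (i : Int)) := by
  intro k
  induction k with
  | zero => exact fun _ => ⟨hs, fun i j _ => rfl, fun i hi => by omega⟩
  | succ k ih =>
    intro hk
    obtain ⟨ihs, ihpres, ihdone⟩ := ih (by omega)
    rw [List.range_succ, List.foldl_append, List.foldl_cons, List.foldl_nil]
    set dp' := (List.range k).foldl (fun dp i => pvSet2 dp i 0 (i : Int)) dp with hdp'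
    refine ⟨pvSet2_shape _ _ _ ihs, ?_, ?_⟩
    · intro i j hc
      rw [pvGet2_set_ne _ _ (by omega)]
      exact ihpres i j (by omega)
    · intro i hi
      rcases Nat.lt_or_ge i k with hik | hik
      · rw [pvGet2_set_ne _ _ (Or.inl (by omega))]
        exact ihdone i hik
      · have : i = k := by omega
        subst this
        rw [pvGet2_set_self _ _ ihs (by omega) (by omega)]

theorem pvRowB_aux (n m : Nat) (dp : List (List Int)) (hs : pvShape dp n m) :
    ∀ l ≤ m+1,
      pvShape ((List.range l).foldl (fun dp j => pvSet2 dp 0 j (j : Int)) dp) n m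
      ∧ (∀ i j, (i ≠ 0 ∨ l ≤ j) →
          pvGet2 ((List.range l).foldl (fun dp j => pvSet2 dp 0 j (j : Int)) dp) i j 0
          = pvGet2 dp i j 0)
      ∧ (∀ j < l, pvGet2 ((List.range l).foldl (fun dp j => pvSet2 dp 0 j (j : Int)) dp) 0 j 0
          = (j : Int)) := by
  intro l
  induction l with
  | zero => exact fun _ => ⟨hs, fun i j _ => rfl, fun j hj => by omega⟩
  | succ l ih =>
    intro hl
    obtain ⟨ihs, ihpres, ihdone⟩ := ih (by omega)
    rw [List.range_succ, List.foldl_append, List.foldl_cons, List.foldl_nil]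
    set dp' := (List.range l).foldl (fun dp j => pvSet2 dp 0 j (j : Int)) dp with hdp'
    refine ⟨pvSet2_shape _ _ _ ihs, ?_, ?_⟩
    · intro i j hc
      rw [pvGet2_set_ne _ _ (by omega)]
      exact ihpres i j (by omega)
    · intro j hj
      rcases Nat.lt_or_ge j l with hjl | hjl
      · rw [pvGet2_set_ne _ _ (Or.inr (by omega))]
        exact ihdone j hjl
      · have : j = l := by omega
        subst this
        rw [pvGet2_set_self _ _ ihs (by omega) (by omega)]

theorem pvCell_i0 (ref hyp : List String) : ∀ i : Nat,
    pvCell ref hyp i 0 = ((i : Int), 0, 0, (i : Int), 0) := by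
  intro i
  induction i with
  | zero => simp [pvCell]
  | succ i ih => simp [pvCell, ih]

theorem pvCell_0j (ref hyp : List String) : ∀ j : Nat,
    pvCell ref hyp 0 (j+1) = ((j : Int) + 1, 0, 0, 0, (j : Int) + 1) := by
  intro j
  induction j with
  | zero => simp [pvCell]
  | succ j ih => simp [pvCell, ih]

theorem pvStepA_sub {ref hyp : List String} {ds us ls : Int × Int × Int × Int × Int} {i j : Nat}
    (hm : ¬ ref.getD i "" = hyp.getD j "") (hd : ds.1 ≤ us.1) (hl : ds.1 ≤ ls.1) :
    pvStepA ref hyp ds us ls i j = (ds.1 + 1, ds.2.1, ds.2.2.1 + 1, ds.2.2.2.1, ds.2.2.2.2) := by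
  simp only [pvStepA, if_neg hm]
  simp [show ¬ us.1 < ds.1 by omega, show ¬ ls.1 < ds.1 by omega]

theorem pvStepA_del {ref hyp : List String} {ds us ls : Int × Int × Int × Int × Int} {i j : Nat}
    (hm : ¬ ref.getD i "" = hyp.getD j "") (hd : us.1 < ds.1) (hl : us.1 ≤ ls.1) :
    pvStepA ref hyp ds us ls i j = (us.1 + 1, us.2.1, us.2.2.1, us.2.2.2.1 + 1, us.2.2.2.2) := by
  simp only [pvStepA, if_neg hm]
  simp [hd, show ¬ ls.1 < us.1 by omega]

theorem pvStepA_ins {ref hyp : List String} {ds us ls : Int × Int × Int × Int × Int} {i j : Nat}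
    (hm : ¬ ref.getD i "" = hyp.getD j "") (hd : ls.1 < ds.1) (hl : ls.1 < us.1) :
    pvStepA ref hyp ds us ls i j = (ls.1 + 1, ls.2.1, ls.2.2.1, ls.2.2.2.1, ls.2.2.2.2 + 1) := by
  simp only [pvStepA, if_neg hm]
  by_cases hin : us.1 < ds.1 <;> simp [hin, hd, hl]

theorem pvStepA_cost (ref hyp : List String) (ds us ls : Int × Int × Int × Int × Int) (i j : Nat) :
    (pvStepA ref hyp ds us ls i j).1 = pvStepB ref hyp ds.1 us.1 ls.1 i j := by
  by_cases hm : ref.getD i "" = hyp.getD j ""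
  · simp only [pvStepA, pvStepB, if_pos hm]
  · simp only [pvStepA, pvStepB, if_neg hm]
    by_cases h1 : us.1 < ds.1 <;> simp [h1] <;> split_ifs with h2 <;> simp <;> omega


theorem pvStepA_match {ref hyp : List String} {ds us ls : Int × Int × Int × Int × Int} {i j : Nat}
    (hm : ref.getD i "" = hyp.getD j "") :
    pvStepA ref hyp ds us ls i j = (ds.1, ds.2.1 + 1, ds.2.2.1, ds.2.2.2.1, ds.2.2.2.2) := by
  simp only [pvStepA, if_pos hm]

theorem pvTraceback_correct (ref hyp : List String) (dp : List (List Int)) (n m : Nat)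
    (hdp : ∀ i, i ≤ n → ∀ j, j ≤ m → pvGet2 dp i j 0 = (pvCell ref hyp i j).1) :
    ∀ N i j, i + j ≤ N → i ≤ n → j ≤ m → ∀ h s d ins,
      pvTraceback ref hyp dp i j h s d ins =
        (h + (pvCell ref hyp i j).2.1, s + (pvCell ref hyp i j).2.2.1,
         d + (pvCell ref hyp i j).2.2.2.1, ins + (pvCell ref hyp i j).2.2.2.2) := by
  intro N
  induction N with
  | zero =>
    intro i j hij hi hj h s d ins
    have hi0 : i = 0 := by omega
    have hj0 : j = 0 := by omega
    subst hi0; subst hj0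
    rw [pvTraceback, dif_neg (by omega)]
    simp [pvCell]
  | succ N ih =>
    intro i j hij hi hj h s d ins
    match i, j with
    | 0, 0 =>
      rw [pvTraceback, dif_neg (by omega)]
      simp [pvCell]
    | 0, j+1 =>
      rw [pvTraceback, dif_pos (by omega), dif_neg (by simp), dif_neg (by simp),
        dif_neg (by simp)]
      simp only [Nat.add_sub_cancel]
      rw [ih 0 j (by omega) (by omega) (by omega) h s d (ins+1)]
      simp only [pvCell]
      simp [Prod.ext_iff]
      omega
    | i+1, 0 =>
      rw [pvTraceback, dif_pos (by omega), dif_neg (by simp), dif_neg (by simp),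
        dif_pos ⟨by omega, Or.inl rfl⟩]
      simp only [Nat.add_sub_cancel]
      rw [ih i 0 (by omega) (by omega) (by omega) h s (d+1) ins]
      simp only [pvCell]
      simp [Prod.ext_iff]
      omega
    | i+1, j+1 =>
      have e1 : pvGet2 dp i j 0 = (pvCell ref hyp i j).1 :=
        hdp i (by omega) j (by omega)
      have e2 : pvGet2 dp i (j+1) 0 = (pvCell ref hyp i (j+1)).1 :=
        hdp i (by omega) (j+1) hj
      have e3 : pvGet2 dp (i+1) j 0 = (pvCell ref hyp (i+1) j).1 :=
        hdp (i+1) hi j (by omega)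
      by_cases hmatch : ref.getD i "" = hyp.getD j ""
      · have hcell : pvCell ref hyp (i+1) (j+1) =
            ((pvCell ref hyp i j).1, (pvCell ref hyp i j).2.1 + 1, (pvCell ref hyp i j).2.2.1,
             (pvCell ref hyp i j).2.2.2.1, (pvCell ref hyp i j).2.2.2.2) := by
          rw [show pvCell ref hyp (i+1) (j+1) = pvStepA ref hyp (pvCell ref hyp i j)
            (pvCell ref hyp i (j+1)) (pvCell ref hyp (i+1) j) i j from by simp [pvCell],
            pvStepA_match hmatch]
        rw [pvTraceback, dif_pos (by omega), dif_pos ⟨by omega, by omega, hmatch⟩]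
        simp only [Nat.add_sub_cancel]
        rw [ih i j (by omega) (by omega) (by omega) (h+1) s d ins, hcell]
        simp [Prod.ext_iff]
        omega
      · have hstep : pvCell ref hyp (i+1) (j+1) = pvStepA ref hyp (pvCell ref hyp i j)
            (pvCell ref hyp i (j+1)) (pvCell ref hyp (i+1) j) i j := by simp [pvCell]
        by_cases hsub : (pvCell ref hyp i j).1 ≤ (pvCell ref hyp i (j+1)).1 ∧
            (pvCell ref hyp i j).1 ≤ (pvCell ref hyp (i+1) j).1
        · have hcell := hstep.trans (pvStepA_sub hmatch hsub.1 hsub.2)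
          rw [pvTraceback, dif_pos (by omega),
            dif_neg (fun hx => hmatch hx.2.2),
            dif_pos ⟨by omega, by omega, by
              show pvGet2 dp i j 0 ≤ pvGet2 dp i (j+1) 0
              rw [e1, e2]; exact hsub.1, by
              show pvGet2 dp i j 0 ≤ pvGet2 dp (i+1) j 0
              rw [e1, e3]; exact hsub.2⟩]
          simp only [Nat.add_sub_cancel]
          rw [ih i j (by omega) (by omega) (by omega) h (s+1) d ins, hcell]
          simp [Prod.ext_iff]
          omega
        · by_cases hdel : (pvCell ref hyp i (j+1)).1 ≤ (pvCell ref hyp (i+1) j).1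
          · have hlt : (pvCell ref hyp i (j+1)).1 < (pvCell ref hyp i j).1 := by
              rcases not_and_or.mp hsub with hx | hx <;> omega
            have hcell := hstep.trans (pvStepA_del hmatch hlt hdel)
            rw [pvTraceback, dif_pos (by omega),
              dif_neg (fun hx => hmatch hx.2.2),
              dif_neg (by
                rintro ⟨-, -, c1, c2⟩
                rw [show pvGet2 dp (i+1-1) (j+1-1) 0 = pvGet2 dp i j 0 from rfl, e1] at c1 c2
                rw [show pvGet2 dp (i+1-1) (j+1) 0 = pvGet2 dp i (j+1) 0 from rfl, e2] at c1
                rw [show pvGet2 dp (i+1) (j+1-1) 0 = pvGet2 dp (i+1) j 0 from rfl, e3] at c2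
                exact hsub ⟨c1, c2⟩),
              dif_pos ⟨by omega, Or.inr (by
                show pvGet2 dp i (j+1) 0 ≤ pvGet2 dp (i+1) j 0
                rw [e2, e3]; exact hdel)⟩]
            simp only [Nat.add_sub_cancel]
            rw [ih i (j+1) (by omega) (by omega) hj h s (d+1) ins, hcell]
            simp [Prod.ext_iff]
            omega
          · have hl1 : (pvCell ref hyp (i+1) j).1 < (pvCell ref hyp i (j+1)).1 := by omega
            have hl2 : (pvCell ref hyp (i+1) j).1 < (pvCell ref hyp i j).1 := by
              rcases not_and_or.mp hsub with hx | hx <;> omega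
            have hcell := hstep.trans (pvStepA_ins hmatch hl2 hl1)
            rw [pvTraceback, dif_pos (by omega),
              dif_neg (fun hx => hmatch hx.2.2),
              dif_neg (by
                rintro ⟨-, -, c1, c2⟩
                rw [show pvGet2 dp (i+1-1) (j+1-1) 0 = pvGet2 dp i j 0 from rfl, e1] at c1 c2
                rw [show pvGet2 dp (i+1-1) (j+1) 0 = pvGet2 dp i (j+1) 0 from rfl, e2] at c1
                rw [show pvGet2 dp (i+1) (j+1-1) 0 = pvGet2 dp (i+1) j 0 from rfl, e3] at c2
                exact hsub ⟨c1, c2⟩),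
              dif_neg (by
                rintro ⟨-, hx⟩
                rcases hx with hx | hx
                · omega
                · rw [show pvGet2 dp (i+1-1) (j+1) 0 = pvGet2 dp i (j+1) 0 from rfl, e2,
                    show pvGet2 dp (i+1) (j+1-1) 0 = pvGet2 dp (i+1) j 0 from rfl, e3] at hx
                  omega)]
            simp only [Nat.add_sub_cancel]
            rw [ih (i+1) j (by omega) hi (by omega) h s d (ins+1), hcell]
            simp [Prod.ext_iff]
            omega


theorem pvCell_step (ref hyp : List String) (i j : Nat) :
    pvCell ref hyp (i+1) (j+1) = pvStepA ref hyp (pvCell ref hyp i j)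
      (pvCell ref hyp i (j+1)) (pvCell ref hyp (i+1) j) i j := by
  simp [pvCell]

theorem pvA_eq_cell (ref hyp : List String) :
    levenshtein_counts_py ref hyp =
      ((pvCell ref hyp ref.length hyp.length).2.1,
       (pvCell ref hyp ref.length hyp.length).2.2.1,
       (pvCell ref hyp ref.length hyp.length).2.2.2.1,
       (pvCell ref hyp ref.length hyp.length).2.2.2.2) := by
  set n := ref.length with hn
  set m := hyp.length with hm
  have hs0 := pvInitA_shape n m
  have h00 : pvGet2 (pvInitA n m) 0 0 pvInfA = pvCell ref hyp 0 0 := by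
    rw [pvInitA_00]; simp [pvCell]
  obtain ⟨hs1, pres1, done1⟩ := pvColA_aux ref hyp n m (pvInitA n m) hs0 h00 n (le_refl n)
  have hs1' : pvShape (pvColLoopA n (pvInitA n m)) n m := hs1
  have done1' : ∀ i ≤ n, pvGet2 (pvColLoopA n (pvInitA n m)) i 0 pvInfA = pvCell ref hyp i 0 :=
    done1
  have h001 : pvGet2 (pvColLoopA n (pvInitA n m)) 0 0 pvInfA = pvCell ref hyp 0 0 :=
    done1' 0 (Nat.zero_le n)
  obtain ⟨hs2, pres2, done2⟩ :=
    pvRowA_aux ref hyp n m (pvColLoopA n (pvInitA n m)) hs1' h001 m (le_refl m)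
  have hs2' : pvShape (pvRowLoopA m (pvColLoopA n (pvInitA n m))) n m := hs2
  have pres2' : ∀ i j, (i ≠ 0 ∨ j = 0 ∨ m < j) →
      pvGet2 (pvRowLoopA m (pvColLoopA n (pvInitA n m))) i j pvInfA
      = pvGet2 (pvColLoopA n (pvInitA n m)) i j pvInfA := pres2
  have done2' : ∀ j ≤ m,
      pvGet2 (pvRowLoopA m (pvColLoopA n (pvInitA n m))) 0 j pvInfA = pvCell ref hyp 0 j :=
    done2
  have hrow0 : ∀ j ≤ m,
      pvGet2 (pvRowLoopA m (pvColLoopA n (pvInitA n m))) 0 j pvInfA = pvCell ref hyp 0 j :=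
    done2'
  have hcol0 : ∀ i ≤ n,
      pvGet2 (pvRowLoopA m (pvColLoopA n (pvInitA n m))) i 0 pvInfA = pvCell ref hyp i 0 := by
    intro i hi
    rcases Nat.eq_zero_or_pos i with rfl | hi0
    · exact done2' 0 (Nat.zero_le m)
    · rw [pres2' i 0 (Or.inl (by omega))]
      exact done1' i hi
  have hfill := pvFill_correct (pvStepA ref hyp) pvInfA (pvCell ref hyp) n m
    (pvRowLoopA m (pvColLoopA n (pvInitA n m))) hs2' (pvCell_step ref hyp) hrow0 hcol0
    n (le_refl n) m (le_refl m)
  show (let t := pvGet2 (pvFill (pvStepA ref hyp) pvInfA n m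
      (pvRowLoopA m (pvColLoopA n (pvInitA n m)))) n m pvInfA
    (t.2.1, t.2.2.1, t.2.2.2.1, t.2.2.2.2)) = _
  rw [hfill]

theorem pvCell_cost_step (ref hyp : List String) (i j : Nat) :
    (pvCell ref hyp (i+1) (j+1)).1 = pvStepB ref hyp (pvCell ref hyp i j).1
      (pvCell ref hyp i (j+1)).1 (pvCell ref hyp (i+1) j).1 i j := by
  rw [pvCell_step, pvStepA_cost]

theorem pvB_eq_cell (ref hyp : List String) :
    levenshtein_counts_py_alt ref hyp =
      ((pvCell ref hyp ref.length hyp.length).2.1,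
       (pvCell ref hyp ref.length hyp.length).2.2.1,
       (pvCell ref hyp ref.length hyp.length).2.2.2.1,
       (pvCell ref hyp ref.length hyp.length).2.2.2.2) := by
  set n := ref.length with hn
  set m := hyp.length with hm
  have hs0 := pvInitB_shape n m
  obtain ⟨hs1, pres1, done1⟩ := pvColB_aux n m (pvInitB n m) hs0 (n+1) (le_refl (n+1))
  have hs1' : pvShape (pvColLoopB n (pvInitB n m)) n m := hs1
  have done1' : ∀ i < n+1, pvGet2 (pvColLoopB n (pvInitB n m)) i 0 0 = (i : Int) := done1
  obtain ⟨hs2, pres2, done2⟩ :=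
    pvRowB_aux n m (pvColLoopB n (pvInitB n m)) hs1' (m+1) (le_refl (m+1))
  have hs2' : pvShape (pvRowLoopB m (pvColLoopB n (pvInitB n m))) n m := hs2
  have pres2' : ∀ i j, (i ≠ 0 ∨ m+1 ≤ j) →
      pvGet2 (pvRowLoopB m (pvColLoopB n (pvInitB n m))) i j 0
      = pvGet2 (pvColLoopB n (pvInitB n m)) i j 0 := pres2
  have done2' : ∀ j < m+1,
      pvGet2 (pvRowLoopB m (pvColLoopB n (pvInitB n m))) 0 j 0 = (j : Int) := done2
  have hrow0 : ∀ j ≤ m,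
      pvGet2 (pvRowLoopB m (pvColLoopB n (pvInitB n m))) 0 j 0 = (pvCell ref hyp 0 j).1 := by
    intro j hj
    rw [done2' j (by omega)]
    rcases Nat.eq_zero_or_pos j with rfl | hj0
    · simp [pvCell]
    · obtain ⟨j, rfl⟩ : ∃ j', j = j'+1 := ⟨j-1, by omega⟩
      rw [pvCell_0j]
      push_cast
      ring
  have hcol0 : ∀ i ≤ n,
      pvGet2 (pvRowLoopB m (pvColLoopB n (pvInitB n m))) i 0 0 = (pvCell ref hyp i 0).1 := by
    intro i hi
    rcases Nat.eq_zero_or_pos i with rfl | hi0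
    · rw [done2' 0 (by omega)]; simp [pvCell]
    · rw [pres2' i 0 (Or.inl (by omega)), done1' i (by omega), pvCell_i0]
  have hfill := pvFill_correct (pvStepB ref hyp) 0 (fun i j => (pvCell ref hyp i j).1) n m
    (pvRowLoopB m (pvColLoopB n (pvInitB n m))) hs2' (pvCell_cost_step ref hyp) hrow0 hcol0
  have htb := pvTraceback_correct ref hyp
    (pvFill (pvStepB ref hyp) 0 n m (pvRowLoopB m (pvColLoopB n (pvInitB n m)))) n m
    (fun i hi j hj => hfill i hi j hj) (n+m) n m (le_refl (n+m)) (le_refl n) (le_refl m)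
    0 0 0 0
  show pvTraceback ref hyp
    (pvFill (pvStepB ref hyp) 0 n m (pvRowLoopB m (pvColLoopB n (pvInitB n m)))) n m 0 0 0 0 = _
  rw [htb]
  simp

-- ===== VERDICT (by name: the statement is the Claim_ definition above) =====
theorem levenshtein_counts_py_spec : Claim_equal_levenshtein_counts_py := by
  intro ref hyp _
  unfold Spec_levenshtein_counts_py
  rw [pvA_eq_cell, pvB_eq_cell]
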